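-- pv_equiv track=rewrite | github.com/yannickloth/W33-Theory | pillars/THEORY_PART_CXCIX_CLIFFORD.py | _merge_indices
-- ===== SOURCE A (Python) =====
-- from typing import Dict, List, Tuple
--
-- def _merge_indices(s1: frozenset, s2: frozenset) -> Tuple[frozenset, int]:
--     """Merge two sorted index sets computing the sign from commutation
--     and the diagonal quadratic form Q(e_i) = 1 for all i (Euclidean)."""
--     l1 = sorted(s1)
--     l2 = sorted(s2)
--
--     # Count transpositions needed and handle cancellations (e_i^2 = Q(e_i) = 1)
--     merged = list(l1) + list(l2)
--     # Bubble sort to count sign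
--     sign = 1
--     for i in range(len(merged)):
--         for j in range(i + 1, len(merged)):
--             if merged[i] > merged[j]:
--                 merged[i], merged[j] = merged[j], merged[i]
--                 sign = (sign * 2) % 3  # -1 = 2 mod 3
--
--     # Cancel pairs (e_i * e_i = Q(e_i) = 1)
--     result = []
--     i = 0
--     while i < len(merged):
--         if i + 1 < len(merged) and merged[i] == merged[i + 1]:
--             # e_i^2 = 1 (diagonal quadratic form)
--             i += 2
--         else:
--             result.append(merged[i])
--             i += 1
--
--     return frozenset(result), sign
-- ===== SOURCE B (Python) =====
-- from typing import Tuple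
--
-- def _merge_indices(s1: frozenset, s2: frozenset) -> Tuple[frozenset, int]:
--     """Single two-pointer merge: the symmetric difference gives the surviving
--     indices, and the number of cross pairs (x in s1, y in s2, x > y) gives the
--     sign, 1 for even, 2 (= -1 mod 3) for odd."""
--     l1 = sorted(s1)
--     l2 = sorted(s2)
--     n1 = len(l1)
--     i = j = 0
--     inv = 0          # pairs (x in s1, y in s2) with x > y
--     result = []
--     while i < n1 and j < len(l2):
--         a, b = l1[i], l2[j]
--         if a < b:
--             result.append(a)
--             i += 1
--         elif a > b:
--             inv += n1 - i      # every remaining element of l1 exceeds b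
--             result.append(b)
--             j += 1
--         else:
--             inv += n1 - i - 1  # elements of l1 strictly above the common value
--             i += 1
--             j += 1
--     result.extend(l1[i:])
--     result.extend(l2[j:])
--     return frozenset(result), 1 if inv % 2 == 0 else 2
-- ===== Notes on version B (the rewrite author's own statement) =====
-- stated objective: faster
-- what changed: A bubble-sorts the concatenated index lists with a quadratic double loop to count swaps and then scans for adjacent duplicates; B does one linear two-pointer merge of the two sorted lists that counts cross pairs (x in s1, y in s2, x > y) for the sign and emits the symmetric difference directly.
import Mathlib
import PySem

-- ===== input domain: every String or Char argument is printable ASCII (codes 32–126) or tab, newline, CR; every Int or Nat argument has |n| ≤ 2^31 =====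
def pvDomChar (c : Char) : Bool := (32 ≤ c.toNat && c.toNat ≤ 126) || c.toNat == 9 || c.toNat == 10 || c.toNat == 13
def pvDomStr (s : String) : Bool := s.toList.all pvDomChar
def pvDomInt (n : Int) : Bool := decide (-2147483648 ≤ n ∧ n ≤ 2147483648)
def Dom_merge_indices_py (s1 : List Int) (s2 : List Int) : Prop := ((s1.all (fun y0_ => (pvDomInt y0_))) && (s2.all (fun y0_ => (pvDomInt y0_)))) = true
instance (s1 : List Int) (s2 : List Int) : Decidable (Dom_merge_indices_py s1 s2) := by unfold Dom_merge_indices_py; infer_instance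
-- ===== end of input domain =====

-- B replaces A's exchange-sort sign counting (quadratic) by a single two-pointer
-- merge that counts cross pairs and builds the symmetric difference directly.

-- ===== PORT A =====
-- one exchange-sort comparison step at fixed outer index i (merged[i] > merged[j] swap, sign update)
def pvStep (i : Int) (st : List Int × Int) (j : Int) : List Int × Int :=
  if PySem.List.pyGetD st.1 i 0 > PySem.List.pyGetD st.1 j 0 then
    (PySem.List.pySetD (PySem.List.pySetD st.1 i (PySem.List.pyGetD st.1 j 0)) j
       (PySem.List.pyGetD st.1 i 0),
     PySem.Int.mod (st.2 * 2) 3)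
  else st

-- inner loop: for j in range(i+1, n)
def pvInner (i n : Int) (st : List Int × Int) : List Int × Int :=
  (PySem.List.pyRange (i + 1) n 1).foldl (pvStep i) st

-- the 'while i < len' cancellation loop, as the obvious structural recursion
def pvCancel : List Int → List Int
  | [] => []
  | [x] => [x]
  | x :: y :: t => if x = y then pvCancel t else x :: pvCancel (y :: t)

def merge_indices_py (s1 : List Int) (s2 : List Int) : List Int × Int :=
  let l1 := PySem.List.sorted (PySem.Set.ofList s1) (fun x => x) false
  let l2 := PySem.List.sorted (PySem.Set.ofList s2) (fun x => x) false
  let merged := l1 ++ l2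
  let n : Int := PySem.List.len merged
  -- indices from range(...) are always in range, so pyGetD/pySetD are exact here
  let st := (PySem.List.pyRange 0 n 1).foldl (fun st i => pvInner i n st) (merged, (1 : Int))
  (PySem.Set.ofList (pvCancel st.1), st.2)

-- ===== PORT B =====
-- two-pointer merge; xs, ys are the unread suffixes l1[i:], l2[j:], so n1 - i = len xs
def pvAltLoop (xs ys : List Int) (inv : Int) (acc : List Int) : List Int × Int :=
  match xs, ys with
  | x :: xs', y :: ys' =>
    if x < y then pvAltLoop xs' (y :: ys') inv (acc ++ [x])
    else if x > y then pvAltLoop (x :: xs') ys' (inv + PySem.List.len (x :: xs')) (acc ++ [y])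
    else pvAltLoop xs' ys' (inv + PySem.List.len xs') acc
  | xs, ys => (acc ++ xs ++ ys, inv)

def merge_indices_py_alt (s1 : List Int) (s2 : List Int) : List Int × Int :=
  let l1 := PySem.List.sorted (PySem.Set.ofList s1) (fun x => x) false
  let l2 := PySem.List.sorted (PySem.Set.ofList s2) (fun x => x) false
  let r := pvAltLoop l1 l2 0 []
  (PySem.Set.ofList r.1, if PySem.Int.mod r.2 2 == 0 then 1 else 2)

-- ===== PRECONDITION & SPEC =====
def Spec_merge_indices_py (s1 : List Int) (s2 : List Int) (out : List Int × Int) : Prop := out = merge_indices_py_alt s1 s2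
instance (s1 : List Int) (s2 : List Int) (out : List Int × Int) : Decidable (Spec_merge_indices_py s1 s2 out) := by unfold Spec_merge_indices_py; infer_instance

-- ===== CLAIM (what is proved, stated in full; the proofs are below) =====
def Claim_equal_merge_indices_py : Prop := ∀ (s1 : List Int) (s2 : List Int), Dom_merge_indices_py s1 s2 → Spec_merge_indices_py s1 s2 (merge_indices_py s1 s2)

-- ===== LEMMAS AND PROOFS =====

-- inversion count (number of pairs p < q with l[p] > l[q])
def pvInv : List Int → Nat
  | [] => 0
  | x :: xs => xs.countP (fun y => decide (y < x)) + pvInv xs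

-- cross inversions between two blocks
def pvCross (u v : List Int) : Nat := (u.map (fun x => v.countP (fun y => decide (y < x)))).sum

-- "no pattern x … x … y with y < x" (needed: each swap of A lowers pvInv by exactly 1)
def pvNoPat (l : List Int) : Prop := ∀ x y : Int, y < x → ¬ List.Sublist [x, x, y] l

-- structural model of A's inner pass: front f, already-scanned slots mid, unscanned s
def pvPass : Int → List Int → List Int → Int × List Int × Nat
  | f, mid, [] => (f, mid, 0)
  | f, mid, h :: t =>
    if f > h then
      let r := pvPass h (mid ++ [f]) t
      (r.1, r.2.1, r.2.2 + 1)
    else pvPass f (mid ++ [h]) t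

theorem pvPass_len (s : List Int) : ∀ f mid, (pvPass f mid s).2.1.length = mid.length + s.length := by
  induction s with
  | nil => intro f mid; simp [pvPass]
  | cons h t ih =>
    intro f mid
    by_cases hfh : f > h
    · simp [pvPass, hfh, ih]; omega
    · simp [pvPass, hfh, ih]; omega

-- structural model of the whole double loop
def pvSort : List Int → List Int × Nat
  | [] => ([], 0)
  | f :: s =>
    let p := pvPass f [] s
    let r := pvSort p.2.1
    (p.1 :: r.1, p.2.2 + r.2)
termination_by l => l.length
decreasing_by simp [pvPass_len]

-- sign recursion: k applications of sign := (sign * 2) % 3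
def pvSignIter : Int → Nat → Int
  | s, 0 => s
  | s, k + 1 => pvSignIter (PySem.Int.mod (s * 2) 3) k

theorem pvSignIter_add (a b : Nat) : ∀ s, pvSignIter s (a + b) = pvSignIter (pvSignIter s a) b := by
  induction a with
  | zero => intro s; simp [pvSignIter]
  | succ a ih =>
    intro s
    have h : a + 1 + b = (a + b) + 1 := by omega
    rw [h]
    show pvSignIter (PySem.Int.mod (s * 2) 3) (a + b) = _
    rw [ih]
    rfl

theorem pvSignIter_one (k : Nat) : pvSignIter 1 k = if k % 2 = 0 then 1 else 2 := by
  have key : ∀ k : Nat, pvSignIter 1 k = (if k % 2 = 0 then 1 else 2) ∧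
      pvSignIter 2 k = (if k % 2 = 0 then 2 else 1) := by
    intro k
    induction k with
    | zero => simp [pvSignIter]
    | succ k ih =>
      have e1 : PySem.Int.mod ((1 : Int) * 2) 3 = 2 := by decide
      have e2 : PySem.Int.mod ((2 : Int) * 2) 3 = 1 := by decide
      constructor
      · show pvSignIter (PySem.Int.mod ((1:Int) * 2) 3) k = _
        rw [e1, ih.2]
        by_cases hk : k % 2 = 0
        · simp [hk, Nat.succ_mod_two_eq_one_iff.mpr hk]
        · have h1 : k % 2 = 1 := by omega
          have h2 : (k + 1) % 2 = 0 := by omega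
          simp [h2, hk]
      · show pvSignIter (PySem.Int.mod ((2:Int) * 2) 3) k = _
        rw [e2, ih.1]
        by_cases hk : k % 2 = 0
        · simp [hk, Nat.succ_mod_two_eq_one_iff.mpr hk]
        · have h2 : (k + 1) % 2 = 0 := by omega
          simp [h2, hk]
  exact (key k).1

theorem pvInv_append (u v : List Int) : pvInv (u ++ v) = pvInv u + pvCross u v + pvInv v := by
  induction u with
  | nil => simp [pvInv, pvCross]
  | cons x u ih =>
    simp [pvInv, pvCross, List.countP_append] at *
    omega

theorem pvInv_eq_zero (l : List Int) (h : l.Pairwise (· ≤ ·)) : pvInv l = 0 := by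
  induction l with
  | nil => rfl
  | cons x xs ih =>
    rcases List.pairwise_cons.mp h with ⟨hx, hxs⟩
    have hc : xs.countP (fun y => decide (y < x)) = 0 := by
      apply List.countP_eq_zero.mpr
      intro y hy
      simpa using not_lt.mpr (hx y hy)
    simp [pvInv, hc, ih hxs]

theorem pvCross_cons_right (u : List Int) (y : Int) (v : List Int) :
    pvCross u (y :: v) = u.countP (fun a => decide (y < a)) + pvCross u v := by
  induction u with
  | nil => simp [pvCross]
  | cons a u ih =>
    simp only [pvCross, List.map_cons, List.sum_cons, List.countP_cons] at *
    split_ifs with h <;> simp at h <;> omega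

-- a swap performed by A (h < f, everything scanned in between exceeds f) lowers pvInv by exactly 1
theorem pvInv_swap (mid t : List Int) (f h : Int) (hh : h < f) (hm : ∀ z ∈ mid, f < z) :
    pvInv (f :: mid ++ h :: t) = pvInv (h :: mid ++ f :: t) + 1 := by
  show pvInv (f :: (mid ++ h :: t)) = pvInv (h :: (mid ++ f :: t)) + 1
  have hmf : mid.countP (fun y => decide (y < f)) = 0 :=
    List.countP_eq_zero.mpr (fun z hz => by simpa using not_lt.mpr (le_of_lt (hm z hz)))
  have hmh : mid.countP (fun y => decide (y < h)) = 0 :=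
    List.countP_eq_zero.mpr (fun z hz => by simpa using not_lt.mpr (le_of_lt (hh.trans (hm z hz))))
  have hmidf : mid.countP (fun a => decide (f < a)) = mid.length :=
    List.countP_eq_length.mpr (fun z hz => by simpa using hm z hz)
  have hmidh : mid.countP (fun a => decide (h < a)) = mid.length :=
    List.countP_eq_length.mpr (fun z hz => by simpa using hh.trans (hm z hz))
  have a1 : pvInv (f :: (mid ++ h :: t)) =
      (mid ++ h :: t).countP (fun y => decide (y < f)) + pvInv (mid ++ h :: t) := rfl
  have a2 : pvInv (h :: (mid ++ f :: t)) =
      (mid ++ f :: t).countP (fun y => decide (y < h)) + pvInv (mid ++ f :: t) := rfl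
  have b1 : (mid ++ h :: t).countP (fun y => decide (y < f)) =
      mid.countP (fun y => decide (y < f)) + (t.countP (fun y => decide (y < f)) + 1) := by
    simp [List.countP_append, List.countP_cons, hh]
  have b2 : (mid ++ f :: t).countP (fun y => decide (y < h)) =
      mid.countP (fun y => decide (y < h)) + t.countP (fun y => decide (y < h)) := by
    simp [List.countP_append, List.countP_cons, not_lt.mpr (le_of_lt hh)]
  have c1 : pvInv (mid ++ h :: t) = pvInv mid + pvCross mid (h :: t) + pvInv (h :: t) :=
    pvInv_append mid (h :: t)
  have c2 : pvInv (mid ++ f :: t) = pvInv mid + pvCross mid (f :: t) + pvInv (f :: t) :=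
    pvInv_append mid (f :: t)
  have d1 : pvCross mid (h :: t) = mid.countP (fun a => decide (h < a)) + pvCross mid t :=
    pvCross_cons_right mid h t
  have d2 : pvCross mid (f :: t) = mid.countP (fun a => decide (f < a)) + pvCross mid t :=
    pvCross_cons_right mid f t
  have e1 : pvInv (h :: t) = t.countP (fun y => decide (y < h)) + pvInv t := rfl
  have e2 : pvInv (f :: t) = t.countP (fun y => decide (y < f)) + pvInv t := rfl
  omega

theorem pvPerm_swap (mid t : List Int) (f h : Int) :
    (f :: mid ++ h :: t).Perm (h :: mid ++ f :: t) := by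
  have p1 : (mid ++ h :: t).Perm (h :: (mid ++ t)) := List.perm_middle
  have p2 : (mid ++ f :: t).Perm (f :: (mid ++ t)) := List.perm_middle
  exact (p1.cons f).trans ((List.Perm.swap h f (mid ++ t)).trans (p2.cons h).symm)

theorem pvNoPat_tail (a : Int) (l : List Int) (h : pvNoPat (a :: l)) : pvNoPat l := by
  intro x y hxy hs
  exact h x y hxy (hs.trans (List.sublist_cons_self a l))

-- the swap preserves the no-pattern invariant
theorem pvNoPat_swap (mid t : List Int) (f h : Int) (hh : h < f) (hm : ∀ z ∈ mid, f ≤ z)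
    (H : pvNoPat (f :: mid ++ h :: t)) : pvNoPat (h :: mid ++ f :: t) := by
  intro x y hyx hsub
  rcases List.sublist_cons_iff.mp hsub with h0 | ⟨r, hr, hrs⟩
  · -- pattern inside mid ++ [f] ++ t
    have h0' : List.Sublist [x, x, y] (mid ++ ([f] ++ t)) := h0
    rcases List.sublist_append_iff.mp h0' with ⟨p2, q34, hpq, hp2, hq34⟩
    rcases List.sublist_append_iff.mp hq34 with ⟨p3, p4, hq, hp3, hp4⟩
    subst hq
    rcases List.sublist_singleton.mp hp3 with rfl | rfl
    · -- p3 = [] : whole pattern inside mid ++ t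
      simp only [List.nil_append] at hpq
      refine H x y hyx ?_
      show List.Sublist [x, x, y] (f :: (mid ++ h :: t))
      rw [hpq]
      exact ((hp2.append hp4).trans (List.Sublist.append_left (List.sublist_cons_self h t) mid)).cons f
    · -- p3 = [f]
      rcases p2 with _ | ⟨a, p2'⟩
      · -- [x,x,y] = f :: p4 : x = f, [x,y] = p4 ⊆ t
        simp only [List.nil_append, List.cons_append, List.cons.injEq] at hpq
        obtain ⟨hxf, hp4e⟩ := hpq
        have hp4' : List.Sublist [x, y] t := by rw [hp4e]; exact hp4
        refine H x y hyx ?_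
        show List.Sublist [x, x, y] (f :: (mid ++ h :: t))
        rw [hxf] at hp4' ⊢
        exact List.Sublist.cons₂ f
          (hp4'.trans ((List.sublist_cons_self h t).trans (List.sublist_append_right mid (h :: t))))
      · rcases p2' with _ | ⟨b, p2''⟩
        · -- p2 = [x], second x is f, p4 = [y]
          simp only [List.cons_append, List.nil_append, List.cons.injEq] at hpq
          obtain ⟨hxa, hxf, hp4e⟩ := hpq
          have hxm : List.Sublist [x] mid := by rw [hxa]; exact hp2
          have hyt : List.Sublist [y] t := by rw [hp4e]; exact hp4
          refine H x y hyx ?_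
          show List.Sublist [x, x, y] (f :: (mid ++ h :: t))
          rw [hxf] at hxm ⊢
          exact List.Sublist.cons₂ f (hxm.append (hyt.trans (List.sublist_cons_self h t)))
        · -- p2 = x :: x :: …, so [x,x] ≤ mid; use y' = h
          simp only [List.cons_append, List.cons.injEq] at hpq
          obtain ⟨hxa, hxb, _⟩ := hpq
          subst hxa
          subst hxb
          have hx2 : List.Sublist [x, x] mid :=
            (List.Sublist.cons₂ x (List.Sublist.cons₂ x (List.nil_sublist p2''))).trans hp2
          have hxm : x ∈ mid := hx2.subset (by simp)
          have hhx : h < x := lt_of_lt_of_le hh (hm x hxm)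
          refine H x h hhx ?_
          show List.Sublist [x, x, h] (f :: (mid ++ h :: t))
          exact (hx2.append (List.Sublist.cons₂ h (List.nil_sublist t))).cons f
  · -- pattern starts with the new head h : x = h
    injection hr with hxh hre
    have hrs' : List.Sublist [x, y] (mid ++ ([f] ++ t)) := by rw [hre]; exact hrs
    rcases List.sublist_append_iff.mp hrs' with ⟨p2, q34, hpq, hp2, hq34⟩
    rcases List.sublist_append_iff.mp hq34 with ⟨p3, p4, hq, hp3, hp4⟩
    subst hq
    rcases p2 with _ | ⟨a, p2'⟩
    · simp only [List.nil_append] at hpq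
      rcases List.sublist_singleton.mp hp3 with rfl | rfl
      · -- [x,y] ≤ t, x = h : pattern h,h,y using the h in the middle of the target
        simp only [List.nil_append] at hpq
        have hxy' : List.Sublist [x, y] t := by rw [hpq]; exact hp4
        refine H h y (hxh ▸ hyx) ?_
        show List.Sublist [h, h, y] (f :: (mid ++ h :: t))
        exact ((List.Sublist.cons₂ h (hxh ▸ hxy')).trans (List.sublist_append_right mid (h :: t))).cons f
      · -- [x,y] = f :: p4 : x = f = h, contradiction with h < f
        simp only [List.cons_append, List.nil_append, List.cons.injEq] at hpq
        obtain ⟨hxf, _⟩ := hpq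
        exact absurd hh (by rw [← hxf, hxh]; exact lt_irrefl h)
    · -- head of p2 is x = h, so h ∈ mid, contradicting h < f ≤ mid
      have hha : x = a := by
        have := hpq
        simp only [List.cons_append, List.cons.injEq] at this
        exact this.1
      have hmem : h ∈ mid := by
        have hma : a ∈ mid := hp2.subset (by simp)
        rw [← hha, hxh] at hma
        exact hma
      exact absurd (hm h hmem) (not_le.mpr hh)

theorem pvPass_spec (s : List Int) : ∀ f mid, pvNoPat (f :: mid ++ s) → (∀ z ∈ mid, f ≤ z) →
    (f :: mid ++ s).Perm ((pvPass f mid s).1 :: (pvPass f mid s).2.1) ∧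
    (∀ z ∈ (pvPass f mid s).2.1, (pvPass f mid s).1 ≤ z) ∧
    pvNoPat ((pvPass f mid s).1 :: (pvPass f mid s).2.1) ∧
    pvInv (f :: mid ++ s) = pvInv ((pvPass f mid s).1 :: (pvPass f mid s).2.1) + (pvPass f mid s).2.2 := by
  induction s with
  | nil =>
    intro f mid H1 H2
    simp only [pvPass]
    refine ⟨by simp, H2, ?_, by simp [pvInv]⟩
    have heq : f :: mid ++ ([] : List Int) = f :: mid := by simp
    exact heq ▸ H1
  | cons h t ih =>
    intro f mid H1 H2
    by_cases hfh : h < f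
    · have hfmem : f ∉ mid := by
        intro hf
        refine H1 f h hfh ?_
        show List.Sublist [f, f, h] (f :: (mid ++ h :: t))
        exact List.Sublist.cons₂ f
          ((List.singleton_sublist.mpr hf).append (List.Sublist.cons₂ h (List.nil_sublist t)))
      have hm' : ∀ z ∈ mid, f < z := fun z hz =>
        lt_of_le_of_ne (H2 z hz) (fun he => hfmem (he ▸ hz))
      have heq : h :: mid ++ f :: t = h :: (mid ++ [f]) ++ t := by simp
      have hnp' : pvNoPat (h :: (mid ++ [f]) ++ t) := heq ▸ pvNoPat_swap mid t f h hfh H2 H1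
      have h2' : ∀ z ∈ mid ++ [f], h ≤ z := by
        intro z hz
        rcases List.mem_append.mp hz with h' | h'
        · exact le_of_lt (hfh.trans (hm' z h'))
        · simp at h'
          exact h' ▸ le_of_lt hfh
      obtain ⟨ihp, ihmin, ihnp, ihinv⟩ := ih h (mid ++ [f]) hnp' h2'
      have hrw : pvPass f mid (h :: t) =
          ((pvPass h (mid ++ [f]) t).1, (pvPass h (mid ++ [f]) t).2.1,
            (pvPass h (mid ++ [f]) t).2.2 + 1) := by
        simp [pvPass, hfh]
      rw [hrw]
      refine ⟨?_, ihmin, ihnp, ?_⟩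
      · refine (pvPerm_swap mid t f h).trans ?_
        have heq2 : h :: mid ++ f :: t = h :: (mid ++ [f]) ++ t := by simp
        rw [heq2]
        exact ihp
      · have hswap := pvInv_swap mid t f h hfh hm'
        rw [heq] at hswap
        simp only [hswap, ihinv]
        omega
    · have hle : f ≤ h := not_lt.mp hfh
      have heq : f :: mid ++ h :: t = f :: (mid ++ [h]) ++ t := by simp
      have H1' : pvNoPat (f :: (mid ++ [h]) ++ t) := heq ▸ H1
      have H2' : ∀ z ∈ mid ++ [h], f ≤ z := by
        intro z hz
        rcases List.mem_append.mp hz with h' | h'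
        · exact H2 z h'
        · simp at h'
          exact h' ▸ hle
      obtain ⟨ihp, ihmin, ihnp, ihinv⟩ := ih f (mid ++ [h]) H1' H2'
      have hrw : pvPass f mid (h :: t) = pvPass f (mid ++ [h]) t := by
        simp [pvPass, hfh]
      rw [hrw]
      refine ⟨?_, ihmin, ihnp, ?_⟩
      · rw [heq]; exact ihp
      · rw [heq]; exact ihinv

theorem pvSort_spec (l : List Int) (h : pvNoPat l) :
    (pvSort l).1.Pairwise (· ≤ ·) ∧ l.Perm (pvSort l).1 ∧ (pvSort l).2 = pvInv l := by
  suffices aux : ∀ (n : Nat) (l : List Int), l.length ≤ n → pvNoPat l →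
      (pvSort l).1.Pairwise (· ≤ ·) ∧ l.Perm (pvSort l).1 ∧ (pvSort l).2 = pvInv l by
    exact aux l.length l le_rfl h
  intro n
  induction n with
  | zero =>
    intro l hl _
    have : l = [] := List.length_eq_zero_iff.mp (by omega)
    subst this
    simp [pvSort, pvInv]
  | succ n ihn =>
    intro l hl hnp
    cases l with
    | nil => simp [pvSort, pvInv]
    | cons f s =>
      have hps := pvPass_spec s f [] (by simpa using hnp) (by simp)
      obtain ⟨hperm, hmin, hnp2, hinv⟩ := hps
      have hlen : (pvPass f [] s).2.1.length = s.length := by simpa using pvPass_len s f []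
      obtain ⟨hpw, hperm2, hcnt⟩ :=
        ihn (pvPass f [] s).2.1 (by simp at hl; omega) (pvNoPat_tail _ _ hnp2)
      have hsort : pvSort (f :: s) =
          ((pvPass f [] s).1 :: (pvSort (pvPass f [] s).2.1).1,
            (pvPass f [] s).2.2 + (pvSort (pvPass f [] s).2.1).2) := by
        simp [pvSort]
      rw [hsort]
      refine ⟨?_, ?_, ?_⟩
      · refine List.pairwise_cons.mpr ⟨?_, hpw⟩
        intro z hz
        exact hmin z (hperm2.mem_iff.mpr hz)
      · have h0 : (f :: s).Perm ((pvPass f [] s).1 :: (pvPass f [] s).2.1) := by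
          have : f :: ([] : List Int) ++ s = f :: s := by simp
          exact this ▸ hperm
        exact h0.trans (hperm2.cons _)
      · have h1 : pvInv (f :: s) = pvInv ((pvPass f [] s).1 :: (pvPass f [] s).2.1) + (pvPass f [] s).2.2 := by
          have : f :: ([] : List Int) ++ s = f :: s := by simp
          exact this ▸ hinv
        have h2 : pvInv ((pvPass f [] s).1 :: (pvPass f [] s).2.1) = pvInv (pvPass f [] s).2.1 := by
          have hc0 : (pvPass f [] s).2.1.countP (fun y => decide (y < (pvPass f [] s).1)) = 0 :=
            List.countP_eq_zero.mpr (fun z hz => by simpa using not_lt.mpr (hmin z hz))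
          show (pvPass f [] s).2.1.countP (fun y => decide (y < (pvPass f [] s).1)) + pvInv (pvPass f [] s).2.1 = _
          rw [hc0]
          omega
        simp only [h1, h2, hcnt]
        omega

-- index-level reading of one position
theorem pvGetAt (pre r : List Int) (x : Int) :
    PySem.List.pyGetD (pre ++ x :: r) (pre.length : Int) 0 = x := by
  have h : PySem.List.pyGetD (pre ++ x :: r) ((pre.length : Nat) : Int) 0 = (pre ++ x :: r).getD pre.length 0 :=
    PySem.List.pyGetD_natCast _ _ _
  rw [h]
  induction pre with
  | nil => rfl
  | cons p ps ih => simpa using ih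

theorem pvSetAt (pre r : List Int) (x v : Int) :
    PySem.List.pySetD (pre ++ x :: r) (pre.length : Int) v = pre ++ v :: r := by
  have h : PySem.List.pySetD (pre ++ x :: r) ((pre.length : Nat) : Int) v = (pre ++ x :: r).set pre.length v :=
    PySem.List.pySetD_natCast _ _ _
  rw [h]
  induction pre with
  | nil => rfl
  | cons p ps ih => simpa [List.set] using ih

-- the inner index loop is pvPass
theorem pvInnerFold_eq (s : List Int) : ∀ (mid pre : List Int) (f sign : Int),
    (PySem.List.pyRange ((pre.length : Int) + 1 + mid.length) ((pre.length : Int) + 1 + mid.length + s.length) 1).foldl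
        (pvStep (pre.length : Int)) (pre ++ f :: (mid ++ s), sign)
      = (pre ++ (pvPass f mid s).1 :: (pvPass f mid s).2.1, pvSignIter sign (pvPass f mid s).2.2) := by
  induction s with
  | nil =>
    intro mid pre f sign
    rw [PySem.List.pyRange_one_eq_nil (by simp)]
    simp [pvPass, pvSignIter]
  | cons h t ih =>
    intro mid pre f sign
    have hab : (pre.length : Int) + 1 + mid.length <
        (pre.length : Int) + 1 + mid.length + ((h :: t).length : Int) := by
      simp only [List.length_append, List.length_cons, List.length_nil]
      push_cast
      omega
    rw [PySem.List.pyRange_one_cons hab, List.foldl_cons]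
    have hl : pre ++ f :: (mid ++ h :: t) = (pre ++ f :: mid) ++ h :: t := by simp
    have hlen2 : (((pre ++ f :: mid).length : Nat) : Int) = (pre.length : Int) + 1 + mid.length := by
      simp only [List.length_append, List.length_cons, List.length_nil]
      push_cast
      omega
    have hget1 : PySem.List.pyGetD (pre ++ f :: (mid ++ h :: t)) (pre.length : Int) 0 = f :=
      pvGetAt pre (mid ++ h :: t) f
    have hget2 : PySem.List.pyGetD (pre ++ f :: (mid ++ h :: t)) ((pre.length : Int) + 1 + mid.length) 0 = h := by
      rw [hl, ← hlen2]
      exact pvGetAt (pre ++ f :: mid) t h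
    by_cases hfh : h < f
    · have hset1 : PySem.List.pySetD (pre ++ f :: (mid ++ h :: t)) (pre.length : Int) h =
          pre ++ h :: (mid ++ h :: t) := pvSetAt pre (mid ++ h :: t) f h
      have hl2 : pre ++ h :: (mid ++ h :: t) = (pre ++ h :: mid) ++ h :: t := by simp
      have hlen3 : (((pre ++ h :: mid).length : Nat) : Int) = (pre.length : Int) + 1 + mid.length := by
        simp only [List.length_append, List.length_cons, List.length_nil]
        push_cast
        omega
      have hset2 : PySem.List.pySetD (pre ++ h :: (mid ++ h :: t)) ((pre.length : Int) + 1 + mid.length) f =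
          pre ++ h :: ((mid ++ [f]) ++ t) := by
        rw [hl2, ← hlen3, pvSetAt]
        simp
      have hstep : pvStep (pre.length : Int) (pre ++ f :: (mid ++ h :: t), sign)
            ((pre.length : Int) + 1 + mid.length)
          = (pre ++ h :: ((mid ++ [f]) ++ t), PySem.Int.mod (sign * 2) 3) := by
        simp only [pvStep, hget1, hget2, hset1, hset2]
        rw [if_pos hfh]
      rw [hstep]
      have ihh := ih (mid ++ [f]) pre h (PySem.Int.mod (sign * 2) 3)
      have hb1 : (pre.length : Int) + 1 + (((mid ++ [f]).length : Nat) : Int) =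
          (pre.length : Int) + 1 + (mid.length : Int) + 1 := by
        simp only [List.length_append, List.length_cons, List.length_nil]
        push_cast
        omega
      have hb2 : (pre.length : Int) + 1 + (((mid ++ [f]).length : Nat) : Int) + (t.length : Int) =
          (pre.length : Int) + 1 + (mid.length : Int) + (((h :: t).length : Nat) : Int) := by
        simp only [List.length_append, List.length_cons, List.length_nil]
        push_cast
        omega
      rw [hb1] at ihh
      have hend : (pre.length : Int) + 1 + (mid.length : Int) + (((h :: t).length : Nat) : Int) =
          (pre.length : Int) + 1 + (mid.length : Int) + 1 + (t.length : Int) := by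
        simp only [List.length_cons]
        push_cast
        omega
      rw [hend, ihh]
      have hpass : pvPass f mid (h :: t) =
          ((pvPass h (mid ++ [f]) t).1, (pvPass h (mid ++ [f]) t).2.1,
            (pvPass h (mid ++ [f]) t).2.2 + 1) := by
        simp [pvPass, hfh]
      rw [hpass]
      simp [pvSignIter]
    · have hstep : pvStep (pre.length : Int) (pre ++ f :: (mid ++ h :: t), sign)
            ((pre.length : Int) + 1 + mid.length)
          = (pre ++ f :: (mid ++ h :: t), sign) := by
        simp only [pvStep, hget1, hget2]
        rw [if_neg hfh]
      rw [hstep]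
      have ihh := ih (mid ++ [h]) pre f sign
      have hb1 : (pre.length : Int) + 1 + (((mid ++ [h]).length : Nat) : Int) =
          (pre.length : Int) + 1 + (mid.length : Int) + 1 := by
        simp only [List.length_append, List.length_cons, List.length_nil]
        push_cast
        omega
      have hb2 : (pre.length : Int) + 1 + (((mid ++ [h]).length : Nat) : Int) + (t.length : Int) =
          (pre.length : Int) + 1 + (mid.length : Int) + (((h :: t).length : Nat) : Int) := by
        simp only [List.length_append, List.length_cons, List.length_nil]
        push_cast
        omega
      have hst : pre ++ f :: ((mid ++ [h]) ++ t) = pre ++ f :: (mid ++ h :: t) := by simp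
      rw [hb1, hst] at ihh
      have hend : (pre.length : Int) + 1 + (mid.length : Int) + (((h :: t).length : Nat) : Int) =
          (pre.length : Int) + 1 + (mid.length : Int) + 1 + (t.length : Int) := by
        simp only [List.length_cons]
        push_cast
        omega
      rw [hend, ihh]
      have hpass : pvPass f mid (h :: t) = pvPass f (mid ++ [h]) t := by
        simp [pvPass, hfh]
      rw [hpass]

-- the outer index loop is pvSort
theorem pvOuterFold_eq (k : Nat) : ∀ (l pre : List Int) (sign n : Int), l.length = k →
    n = (pre.length : Int) + l.length →
    (PySem.List.pyRange (pre.length : Int) n 1).foldl (fun st i => pvInner i n st) (pre ++ l, sign)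
      = (pre ++ (pvSort l).1, pvSignIter sign (pvSort l).2) := by
  induction k with
  | zero =>
    intro l pre sign n hk hn
    have : l = [] := List.length_eq_zero_iff.mp hk
    subst this
    rw [PySem.List.pyRange_one_eq_nil (by simp at hn; omega)]
    simp [pvSort, pvSignIter]
  | succ k ihk =>
    intro l pre sign n hk hn
    cases l with
    | nil => simp at hk
    | cons f s =>
      have hlt : (pre.length : Int) < n := by
        simp at hn
        push_cast at hn
        omega
      rw [PySem.List.pyRange_one_cons hlt, List.foldl_cons]
      have hinner := pvInnerFold_eq s [] pre f sign
      have hb1 : ((pre.length : Int) + 1 + ((([] : List Int).length : Nat) : Int)) = (pre.length : Int) + 1 := by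
        simp
      have hb2 : ((pre.length : Int) + 1 + (s.length : Int)) = n := by
        simp at hn
        push_cast at hn
        omega
      rw [hb1, hb2] at hinner
      have hstep : pvInner (pre.length : Int) n (pre ++ f :: s, sign) =
          (pre ++ (pvPass f [] s).1 :: (pvPass f [] s).2.1, pvSignIter sign (pvPass f [] s).2.2) := by
        unfold pvInner
        exact hinner
      rw [hstep]
      have hlen : (pvPass f [] s).2.1.length = s.length := by simpa using pvPass_len s f []
      have ihk' := ihk (pvPass f [] s).2.1 (pre ++ [(pvPass f [] s).1])
        (pvSignIter sign (pvPass f [] s).2.2) n (by simp at hk; omega)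
        (by
          simp only [List.length_append, List.length_cons, List.length_nil, hlen]
          simp at hn
          push_cast at hn ⊢
          omega)
      have hb3 : (((pre ++ [(pvPass f [] s).1]).length : Nat) : Int) = (pre.length : Int) + 1 := by
        simp only [List.length_append, List.length_cons, List.length_nil]
        push_cast
        omega
      have hb4 : (pre ++ [(pvPass f [] s).1]) ++ (pvPass f [] s).2.1 =
          pre ++ (pvPass f [] s).1 :: (pvPass f [] s).2.1 := by simp
      rw [hb3, hb4] at ihk'
      rw [ihk']
      have hsort : pvSort (f :: s) =
          ((pvPass f [] s).1 :: (pvSort (pvPass f [] s).2.1).1,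
            (pvPass f [] s).2.2 + (pvSort (pvPass f [] s).2.1).2) := by
        simp [pvSort]
      rw [hsort]
      simp only [Prod.mk.injEq]
      refine ⟨by simp, ?_⟩
      rw [pvSignIter_add]

-- no x…x…y pattern in a concatenation of two strictly increasing lists
theorem pvNoPat_append (l1 l2 : List Int) (h1 : l1.Pairwise (· < ·)) (h2 : l2.Pairwise (· < ·)) :
    pvNoPat (l1 ++ l2) := by
  intro x y hyx hsub
  rcases List.sublist_append_iff.mp hsub with ⟨p, q, hpq, hp, hq⟩
  rcases p with _ | ⟨a, p⟩
  · simp only [List.nil_append] at hpq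
    subst hpq
    have hp' := List.Pairwise.sublist hq h2
    rcases List.pairwise_cons.mp hp' with ⟨hxx, _⟩
    exact absurd (hxx x (by simp)) (lt_irrefl x)
  · rcases p with _ | ⟨b, p⟩
    · simp only [List.cons_append, List.nil_append, List.cons.injEq] at hpq
      obtain ⟨hxa, hq2⟩ := hpq
      have hq' : List.Sublist [x, y] l2 := by rw [hq2]; exact hq
      have hp' := List.Pairwise.sublist hq' h2
      rcases List.pairwise_cons.mp hp' with ⟨hxy2, _⟩
      exact absurd (hxy2 y (by simp)) (not_lt.mpr (le_of_lt hyx))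
    · rcases p with _ | ⟨c, p⟩
      · simp only [List.cons_append, List.nil_append, List.cons.injEq] at hpq
        obtain ⟨hxa, hxb, _⟩ := hpq
        subst hxa
        subst hxb
        have hp' := List.Pairwise.sublist hp h1
        rcases List.pairwise_cons.mp hp' with ⟨hxx, _⟩
        exact absurd (hxx x (by simp)) (lt_irrefl x)
      · simp only [List.cons_append, List.cons.injEq] at hpq
        obtain ⟨hxa, hxb, hrest⟩ := hpq
        subst hxa
        subst hxb
        have hx2 : List.Sublist [x, x] l1 :=
          (List.Sublist.cons₂ x (List.Sublist.cons₂ x (List.nil_sublist (c :: p)))).trans hp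
        have hp' := List.Pairwise.sublist hx2 h1
        rcases List.pairwise_cons.mp hp' with ⟨hxx, _⟩
        exact absurd (hxx x (by simp)) (lt_irrefl x)

theorem pvCancel_subset (l : List Int) : ∀ z ∈ pvCancel l, z ∈ l := by
  induction l using pvCancel.induct with
  | case1 => simp [pvCancel]
  | case2 a => simp [pvCancel]
  | case3 a t ih =>
    intro z hz
    simp only [pvCancel, eq_self_iff_true, if_true] at hz
    exact List.mem_cons_of_mem a (List.mem_cons_of_mem a (ih z hz))
  | case4 a b t hab ih =>
    intro z hz
    simp only [pvCancel, if_neg hab] at hz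
    rcases List.mem_cons.mp hz with h | h
    · exact h ▸ List.mem_cons_self
    · exact List.mem_cons_of_mem a (ih z h)

-- cancellation on a sorted list with multiplicities ≤ 2: membership = count 1
theorem pvCancel_mem (l : List Int) (hs : l.Pairwise (· ≤ ·)) (hc : ∀ x : Int, l.count x ≤ 2) :
    ∀ x : Int, x ∈ pvCancel l ↔ l.count x = 1 := by
  revert hs hc
  induction l using pvCancel.induct with
  | case1 => intro _ _ x; simp [pvCancel]
  | case2 a =>
    intro _ _ x
    by_cases hx : x = a
    · simp [pvCancel, hx, List.count_cons]
    · simp [pvCancel, hx, List.count_cons, Ne.symm hx]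
  | case3 a t ih =>
    intro hs hc x
    have hat : a ∉ t := by
      have := hc a
      simp [List.count_cons] at this
      exact List.count_eq_zero.mp (by omega)
    have ihs : t.Pairwise (· ≤ ·) := (List.pairwise_cons.mp (List.pairwise_cons.mp hs).2).2
    have ihc : ∀ z : Int, t.count z ≤ 2 := by
      intro z
      have h1 := hc z
      simp [List.count_cons] at h1
      omega
    by_cases hx : x = a
    · subst hx
      simp only [pvCancel, eq_self_iff_true, if_true]
      constructor
      · intro hmem
        exact absurd (pvCancel_subset t x hmem) hat
      · intro hcnt
        simp [List.count_cons, List.count_eq_zero.mpr hat] at hcnt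
    · simp only [pvCancel, eq_self_iff_true, if_true]
      rw [ih ihs ihc x]
      simp [List.count_cons, Ne.symm hx]
  | case4 a b t hab ih =>
    intro hs hc x
    rcases List.pairwise_cons.mp hs with ⟨ha1, hs1⟩
    rcases List.pairwise_cons.mp hs1 with ⟨hb1, _⟩
    have hanb : a ∉ b :: t := by
      intro hmem
      rcases List.mem_cons.mp hmem with h | h
      · exact hab h
      · exact hab (le_antisymm (ha1 b List.mem_cons_self) (le_trans (hb1 a h) (le_refl a)))
    have ihc : ∀ z : Int, (b :: t).count z ≤ 2 := by
      intro z
      have h1 := hc z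
      simp [List.count_cons] at h1 ⊢
      omega
    by_cases hx : x = a
    · subst hx
      simp only [pvCancel, if_neg hab]
      simp [List.count_cons, List.count_eq_zero.mpr hanb]
    · simp only [pvCancel, if_neg hab]
      rw [List.mem_cons]
      simp only [hx, false_or]
      rw [ih hs1 ihc x]
      simp [List.count_cons, Ne.symm hx]

theorem pvCancel_sorted (l : List Int) (hs : l.Pairwise (· ≤ ·)) :
    (pvCancel l).Pairwise (· < ·) := by
  revert hs
  induction l using pvCancel.induct with
  | case1 => intro _; simp [pvCancel]
  | case2 a => intro _; simp [pvCancel]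
  | case3 a t ih =>
    intro hs
    simp only [pvCancel, eq_self_iff_true, if_true]
    exact ih (List.pairwise_cons.mp (List.pairwise_cons.mp hs).2).2
  | case4 a b t hab ih =>
    intro hs
    rcases List.pairwise_cons.mp hs with ⟨ha1, hs1⟩
    rcases List.pairwise_cons.mp hs1 with ⟨hb1, _⟩
    simp only [pvCancel, if_neg hab]
    refine List.pairwise_cons.mpr ⟨?_, ih hs1⟩
    intro z hz
    rcases List.mem_cons.mp (pvCancel_subset _ z hz) with h | h
    · subst h
      exact lt_of_le_of_ne (ha1 z List.mem_cons_self) hab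
    · exact lt_of_lt_of_le (lt_of_le_of_ne (ha1 b List.mem_cons_self) hab) (hb1 z h)

-- B's merge core
def pvMergeD : List Int → List Int → List Int
  | [], ys => ys
  | xs, [] => xs
  | x :: xs', y :: ys' =>
    if x < y then x :: pvMergeD xs' (y :: ys')
    else if y < x then y :: pvMergeD (x :: xs') ys'
    else pvMergeD xs' ys'

theorem pvMergeD_subset (xs ys : List Int) : ∀ z ∈ pvMergeD xs ys, z ∈ xs ∨ z ∈ ys := by
  induction xs, ys using pvMergeD.induct with
  | case1 ys => simp [pvMergeD]
  | case2 xs => intro z hz; left; simpa [pvMergeD] using hz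
  | case3 x xs' y ys' hxy ih =>
    intro z hz
    simp only [pvMergeD, if_pos hxy] at hz
    rcases List.mem_cons.mp hz with h | h
    · exact Or.inl (h ▸ List.mem_cons_self)
    · rcases ih z h with h' | h'
      · exact Or.inl (List.mem_cons_of_mem x h')
      · exact Or.inr h'
  | case4 x xs' y ys' hxy hyx ih =>
    intro z hz
    simp only [pvMergeD, if_neg hxy, if_pos hyx] at hz
    rcases List.mem_cons.mp hz with h | h
    · exact Or.inr (h ▸ List.mem_cons_self)
    · rcases ih z h with h' | h'
      · exact Or.inl h'
      · exact Or.inr (List.mem_cons_of_mem y h')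
  | case5 x xs' y ys' hxy hyx ih =>
    intro z hz
    simp only [pvMergeD, if_neg hxy, if_neg hyx] at hz
    rcases ih z hz with h' | h'
    · exact Or.inl (List.mem_cons_of_mem x h')
    · exact Or.inr (List.mem_cons_of_mem y h')

theorem pvMergeD_sorted (xs ys : List Int) (h1 : xs.Pairwise (· < ·)) (h2 : ys.Pairwise (· < ·)) :
    (pvMergeD xs ys).Pairwise (· < ·) := by
  revert h1 h2
  induction xs, ys using pvMergeD.induct with
  | case1 ys => intro _ h2; simpa [pvMergeD] using h2
  | case2 xs => intro h1 _; simpa [pvMergeD] using h1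
  | case3 x xs' y ys' hxy ih =>
    intro h1 h2
    rcases List.pairwise_cons.mp h1 with ⟨hx1, hxs1⟩
    simp only [pvMergeD, if_pos hxy]
    refine List.pairwise_cons.mpr ⟨?_, ih hxs1 h2⟩
    intro z hz
    rcases pvMergeD_subset _ _ z hz with h | h
    · exact hx1 z h
    · rcases List.pairwise_cons.mp h2 with ⟨hy1, _⟩
      rcases List.mem_cons.mp h with h' | h'
      · exact h' ▸ hxy
      · exact hxy.trans (hy1 z h')
  | case4 x xs' y ys' hxy hyx ih =>
    intro h1 h2
    rcases List.pairwise_cons.mp h2 with ⟨hy1, hys1⟩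
    simp only [pvMergeD, if_neg hxy, if_pos hyx]
    refine List.pairwise_cons.mpr ⟨?_, ih h1 hys1⟩
    intro z hz
    rcases pvMergeD_subset _ _ z hz with h | h
    · rcases List.pairwise_cons.mp h1 with ⟨hx1, _⟩
      rcases List.mem_cons.mp h with h' | h'
      · exact h' ▸ hyx
      · exact hyx.trans (hx1 z h')
    · exact hy1 z h
  | case5 x xs' y ys' hxy hyx ih =>
    intro h1 h2
    simp only [pvMergeD, if_neg hxy, if_neg hyx]
    exact ih (List.pairwise_cons.mp h1).2 (List.pairwise_cons.mp h2).2

theorem pvMergeD_mem (xs ys : List Int) (h1 : xs.Pairwise (· < ·)) (h2 : ys.Pairwise (· < ·)) :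
    ∀ z : Int, z ∈ pvMergeD xs ys ↔ (z ∈ xs ∧ z ∉ ys) ∨ (z ∈ ys ∧ z ∉ xs) := by
  revert h1 h2
  induction xs, ys using pvMergeD.induct with
  | case1 ys => intro _ _ z; simp [pvMergeD]
  | case2 xs => intro _ _ z; simp [pvMergeD]
  | case3 x xs' y ys' hxy ih =>
    intro h1 h2 z
    rcases List.pairwise_cons.mp h1 with ⟨hx1, hxs1⟩
    rcases List.pairwise_cons.mp h2 with ⟨hy1, _⟩
    have hxny : x ∉ y :: ys' := by
      intro hmem
      rcases List.mem_cons.mp hmem with h | h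
      · exact absurd (h ▸ hxy) (lt_irrefl x)
      · exact absurd (hxy.trans (hy1 x h)) (lt_irrefl x)
    simp only [pvMergeD, if_pos hxy]
    by_cases hz : z = x
    · subst hz
      simp [hxny]
    · simp only [List.mem_cons, hz, false_or, ih hxs1 h2 z]
  | case4 x xs' y ys' hxy hyx ih =>
    intro h1 h2 z
    rcases List.pairwise_cons.mp h1 with ⟨hx1, _⟩
    rcases List.pairwise_cons.mp h2 with ⟨hy1, hys1⟩
    have hynx : y ∉ x :: xs' := by
      intro hmem
      rcases List.mem_cons.mp hmem with h | h
      · exact absurd (h ▸ hyx) (lt_irrefl y)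
      · exact absurd (hyx.trans (hx1 y h)) (lt_irrefl y)
    simp only [pvMergeD, if_neg hxy, if_pos hyx]
    by_cases hz : z = y
    · subst hz
      simp [hynx]
    · simp only [List.mem_cons, hz, false_or, ih h1 hys1 z]
  | case5 x xs' y ys' hxy hyx ih =>
    intro h1 h2 z
    have hxy' : x = y := le_antisymm (not_lt.mp hyx) (not_lt.mp hxy)
    subst hxy'
    rcases List.pairwise_cons.mp h1 with ⟨hx1, hxs1⟩
    rcases List.pairwise_cons.mp h2 with ⟨hy1, hys1⟩
    have hxxs : x ∉ xs' := fun h => absurd (hx1 x h) (lt_irrefl x)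
    have hxys : x ∉ ys' := fun h => absurd (hy1 x h) (lt_irrefl x)
    simp only [pvMergeD, if_neg hxy, if_neg hyx]
    by_cases hz : z = x
    · subst hz
      rw [ih hxs1 hys1 z]
      simp [hxxs, hxys]
    · simp only [List.mem_cons, hz, false_or, ih hxs1 hys1 z]

theorem pvAltLoop_eq (xs ys : List Int) (h1 : xs.Pairwise (· < ·)) (h2 : ys.Pairwise (· < ·)) :
    ∀ (inv : Int) (acc : List Int),
      pvAltLoop xs ys inv acc = (acc ++ pvMergeD xs ys, inv + (pvCross xs ys : Int)) := by
  suffices aux : ∀ (n : Nat) (xs ys : List Int), xs.length + ys.length ≤ n →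
      xs.Pairwise (· < ·) → ys.Pairwise (· < ·) → ∀ (inv : Int) (acc : List Int),
      pvAltLoop xs ys inv acc = (acc ++ pvMergeD xs ys, inv + (pvCross xs ys : Int)) by
    exact fun inv acc => aux (xs.length + ys.length) xs ys le_rfl h1 h2 inv acc
  intro n
  induction n with
  | zero =>
    intro xs ys hlen _ _ inv acc
    have hx : xs = [] := List.length_eq_zero_iff.mp (by omega)
    have hy : ys = [] := List.length_eq_zero_iff.mp (by omega)
    subst hx; subst hy
    simp [pvAltLoop, pvMergeD, pvCross]
  | succ n ihn =>
    intro xs ys hlen hp1 hp2 inv acc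
    match xs, ys with
    | [], ys => simp [pvAltLoop, pvMergeD, pvCross]
    | x :: xs', [] => simp [pvAltLoop, pvMergeD, pvCross]
    | x :: xs', y :: ys' =>
      rcases List.pairwise_cons.mp hp1 with ⟨hx1, hxs1⟩
      rcases List.pairwise_cons.mp hp2 with ⟨hy1, hys1⟩
      by_cases hlt : x < y
      · have hcz : (y :: ys').countP (fun b => decide (b < x)) = 0 := by
          apply List.countP_eq_zero.mpr
          intro b hb
          rcases List.mem_cons.mp hb with h | h
          · simpa [h] using not_lt.mpr (le_of_lt hlt)
          · simpa using not_lt.mpr (le_of_lt (hlt.trans (hy1 b h)))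
        simp only [pvAltLoop, if_pos hlt]
        rw [ihn xs' (y :: ys') (by simp at hlen ⊢; omega) hxs1 hp2 inv (acc ++ [x])]
        have hm : pvMergeD (x :: xs') (y :: ys') = x :: pvMergeD xs' (y :: ys') := by
          simp [pvMergeD, hlt]
        have hcr : pvCross (x :: xs') (y :: ys') = pvCross xs' (y :: ys') := by
          simp [pvCross, hcz]
        rw [hm, hcr]
        simp
      · by_cases hgt : x > y
        · have hcnt : (x :: xs').countP (fun a => decide (y < a)) = (x :: xs').length := by
            apply List.countP_eq_length.mpr
            intro a ha
            rcases List.mem_cons.mp ha with h | h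
            · simpa [h] using hgt
            · simpa using hgt.trans (hx1 a h)
          simp only [pvAltLoop, if_neg hlt, if_pos hgt]
          rw [ihn (x :: xs') ys' (by simp at hlen ⊢; omega) hp1 hys1
              (inv + PySem.List.len (x :: xs')) (acc ++ [y])]
          have hm : pvMergeD (x :: xs') (y :: ys') = y :: pvMergeD (x :: xs') ys' := by
            simp [pvMergeD, hlt, hgt]
          have hcr : pvCross (x :: xs') (y :: ys') = (x :: xs').length + pvCross (x :: xs') ys' := by
            rw [pvCross_cons_right, hcnt]
          rw [hm, hcr]
          simp only [PySem.List.len_eq, Prod.mk.injEq]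
          refine ⟨by simp, by push_cast; ring⟩
        · have hxy : x = y := le_antisymm (not_lt.mp hgt) (not_lt.mp hlt)
          subst hxy
          have hc1 : xs'.countP (fun a => decide (x < a)) = xs'.length :=
            List.countP_eq_length.mpr (fun a ha => by simpa using hx1 a ha)
          have hc2 : (x :: ys').countP (fun b => decide (b < x)) = 0 := by
            apply List.countP_eq_zero.mpr
            intro b hb
            rcases List.mem_cons.mp hb with h | h
            · simpa [h] using lt_irrefl x
            · simpa using not_lt.mpr (le_of_lt (hy1 b h))
          simp only [pvAltLoop, if_neg hlt, if_neg (lt_irrefl x)]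
          rw [ihn xs' ys' (by simp at hlen ⊢; omega) hxs1 hys1 (inv + PySem.List.len xs') acc]
          have hm : pvMergeD (x :: xs') (x :: ys') = pvMergeD xs' ys' := by
            simp [pvMergeD]
          have hcr : pvCross (x :: xs') (x :: ys') = xs'.length + pvCross xs' ys' := by
            have e1 : pvCross (x :: xs') (x :: ys') = (x :: ys').countP (fun b => decide (b < x)) + pvCross xs' (x :: ys') := by
              simp [pvCross]
            rw [e1, hc2, pvCross_cons_right, hc1]
            omega
          rw [hm, hcr]
          simp only [PySem.List.len_eq, Prod.mk.injEq]
          refine ⟨by simp, by push_cast; ring⟩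

-- two strictly increasing lists with the same members are equal
theorem pvSortedLtExt (l1 : List Int) : ∀ l2 : List Int, l1.Pairwise (· < ·) → l2.Pairwise (· < ·) →
    (∀ x : Int, x ∈ l1 ↔ x ∈ l2) → l1 = l2 := by
  induction l1 with
  | nil =>
    intro l2 _ h2 hm
    cases l2 with
    | nil => rfl
    | cons b t => exact absurd ((hm b).mpr List.mem_cons_self) (by simp)
  | cons a l ih =>
    intro l2 h1 h2 hm
    cases l2 with
    | nil => exact absurd ((hm a).mp List.mem_cons_self) (by simp)
    | cons b t =>
      rcases List.pairwise_cons.mp h1 with ⟨ha1, hl1⟩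
      rcases List.pairwise_cons.mp h2 with ⟨hb1, ht1⟩
      have hab : a = b := by
        rcases List.mem_cons.mp ((hm a).mp List.mem_cons_self) with h | h
        · exact h
        · rcases List.mem_cons.mp ((hm b).mpr List.mem_cons_self) with h' | h'
          · exact h'.symm
          · exact absurd (hb1 a h) (not_lt.mpr (le_of_lt (ha1 b h')))
      subst hab
      have hmt : ∀ x : Int, x ∈ l ↔ x ∈ t := by
        intro x
        constructor
        · intro hx
          rcases List.mem_cons.mp ((hm x).mp (List.mem_cons_of_mem a hx)) with h | h
          · exact absurd (ha1 x hx) (by simp [h])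
          · exact h
        · intro hx
          rcases List.mem_cons.mp ((hm x).mpr (List.mem_cons_of_mem a hx)) with h | h
          · exact absurd (hb1 x hx) (by simp [h])
          · exact h
      rw [ih t hl1 ht1 hmt]

-- ===== VERDICT (by name: the statement is the Claim_ definition above) =====
theorem merge_indices_py_spec : Claim_equal_merge_indices_py := by
  intro s1 s2 _
  unfold Spec_merge_indices_py
  show merge_indices_py s1 s2 = merge_indices_py_alt s1 s2
  have hp1 : (PySem.List.sorted (PySem.Set.ofList s1) (fun x => x) false).Pairwise (· < ·) :=
    PySem.List.sorted_ofList_pairwise_lt s1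
  have hp2 : (PySem.List.sorted (PySem.Set.ofList s2) (fun x => x) false).Pairwise (· < ·) :=
    PySem.List.sorted_ofList_pairwise_lt s2
  unfold merge_indices_py merge_indices_py_alt
  dsimp only
  generalize hg1 : PySem.List.sorted (PySem.Set.ofList s1) (fun x => x) false = l1 at hp1 ⊢
  generalize hg2 : PySem.List.sorted (PySem.Set.ofList s2) (fun x => x) false = l2 at hp2 ⊢
  have hlen : PySem.List.len (l1 ++ l2) = (((l1 ++ l2).length : Nat) : Int) := PySem.List.len_eq _
  have houter := pvOuterFold_eq (l1 ++ l2).length (l1 ++ l2) [] 1 (((l1 ++ l2).length : Nat) : Int)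
    rfl (by simp)
  simp only [List.length_nil, Nat.cast_zero, List.nil_append] at houter
  rw [hlen, houter]
  obtain ⟨hsorted, hperm, hcnt⟩ := pvSort_spec (l1 ++ l2) (pvNoPat_append l1 l2 hp1 hp2)
  rw [pvAltLoop_eq l1 l2 hp1 hp2 0 []]
  dsimp only
  simp only [List.nil_append, zero_add]
  have hnd1 : l1.Nodup := List.Pairwise.imp (fun h => ne_of_lt h) hp1
  have hnd2 : l2.Nodup := List.Pairwise.imp (fun h => ne_of_lt h) hp2
  have hinv : pvInv (l1 ++ l2) = pvCross l1 l2 := by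
    rw [pvInv_append, pvInv_eq_zero l1 (hp1.imp (fun h => le_of_lt h)),
      pvInv_eq_zero l2 (hp2.imp (fun h => le_of_lt h))]
    omega
  have hcount2 : ∀ x : Int, (pvSort (l1 ++ l2)).1.count x ≤ 2 := by
    intro x
    rw [← hperm.count_eq x]
    have c1 := List.nodup_iff_count_le_one.mp hnd1 x
    have c2 := List.nodup_iff_count_le_one.mp hnd2 x
    simp only [List.count_append]
    omega
  have hlist : pvCancel (pvSort (l1 ++ l2)).1 = pvMergeD l1 l2 := by
    apply pvSortedLtExt _ _ (pvCancel_sorted _ hsorted) (pvMergeD_sorted l1 l2 hp1 hp2)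
    intro x
    rw [pvCancel_mem _ hsorted hcount2 x, pvMergeD_mem l1 l2 hp1 hp2 x]
    rw [← hperm.count_eq x]
    simp only [List.count_append]
    have c1 := List.nodup_iff_count_le_one.mp hnd1 x
    have c2 := List.nodup_iff_count_le_one.mp hnd2 x
    by_cases h1m : x ∈ l1 <;> by_cases h2m : x ∈ l2
    · have d1 : 0 < l1.count x := List.count_pos_iff.mpr h1m
      have d2 : 0 < l2.count x := List.count_pos_iff.mpr h2m
      simp [h1m, h2m]
      omega
    · have d1 : 0 < l1.count x := List.count_pos_iff.mpr h1m
      have d2 : l2.count x = 0 := List.count_eq_zero.mpr h2m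
      simp [h1m, h2m]
      omega
    · have d1 : l1.count x = 0 := List.count_eq_zero.mpr h1m
      have d2 : 0 < l2.count x := List.count_pos_iff.mpr h2m
      simp [h1m, h2m]
      omega
    · have d1 : l1.count x = 0 := List.count_eq_zero.mpr h1m
      have d2 : l2.count x = 0 := List.count_eq_zero.mpr h2m
      simp [h1m, h2m]
      omega
  rw [hlist, hcnt, hinv, pvSignIter_one]
  simp only [Prod.mk.injEq, true_and]
  have hmodd : PySem.Int.mod (((pvCross l1 l2 : Nat) : Int)) 2 = (((pvCross l1 l2 % 2 : Nat) : Int)) := by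
    exact_mod_cast PySem.Int.mod_natCast (pvCross l1 l2) 2
  rw [hmodd]
  by_cases hpar : pvCross l1 l2 % 2 = 0
  · simp [hpar]
  · have h1 : pvCross l1 l2 % 2 = 1 := by omega
    simp [hpar, h1]
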